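-- pv_equiv track=rewrite | github.com/recitalAI/loralay-datasets | src/remove_abstract.py | find_word_idx_for_span
-- ===== SOURCE A (Python) =====
-- def find_word_idx_for_span(text, start_idx, end_idx):
--     new_splitted_text = (
--         text[:start_idx].split()
--         + ["<IS_ABSTRACT>"] * len(text[start_idx: end_idx].split())
--         + text[end_idx:].split()
--     )
--
--     abstract_idx = [
--         i for i, w in enumerate(new_splitted_text) if w == "<IS_ABSTRACT>"
--     ]
--
--     if len(abstract_idx) == 0:
--         return None
--
--     if len(abstract_idx) == len(text.split()):
--         return None
--
--     return (abstract_idx[0], abstract_idx[-1])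
-- ===== SOURCE B (Python) =====
-- def find_word_idx_for_span(text, start_idx, end_idx):
--     p = len(text[:start_idx].split())
--     span = len(text[start_idx:end_idx].split())
--     if span == 0:
--         return None
--     if span == len(text.split()):
--         return None
--     return (p, p + span - 1)
-- ===== Notes on version B (the rewrite author's own statement) =====
-- stated objective: simpler
-- what changed: Replaces A's strategy of building a combined token list with '<IS_ABSTRACT>' sentinel markers and rescanning it with enumerate by direct word-count arithmetic: p = len(prefix.split()), span = len(middle.split()), answer (p, p+span-1).
-- intended difference: On texts where the literal token '<IS_ABSTRACT>' occurs as a real whitespace-delimited word of the prefix text[:start_idx] or the suffix text[end_idx:], A confuses those words with its sentinel markers and returns their positions (typically a wrong span, or None), while B returns the word indices of the actual character span, which is the intended value. — e.g. on find_word_idx_for_span("<IS_ABSTRACT> a", 14, 15): A returns none, B returns some (1, 1)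
import Mathlib
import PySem

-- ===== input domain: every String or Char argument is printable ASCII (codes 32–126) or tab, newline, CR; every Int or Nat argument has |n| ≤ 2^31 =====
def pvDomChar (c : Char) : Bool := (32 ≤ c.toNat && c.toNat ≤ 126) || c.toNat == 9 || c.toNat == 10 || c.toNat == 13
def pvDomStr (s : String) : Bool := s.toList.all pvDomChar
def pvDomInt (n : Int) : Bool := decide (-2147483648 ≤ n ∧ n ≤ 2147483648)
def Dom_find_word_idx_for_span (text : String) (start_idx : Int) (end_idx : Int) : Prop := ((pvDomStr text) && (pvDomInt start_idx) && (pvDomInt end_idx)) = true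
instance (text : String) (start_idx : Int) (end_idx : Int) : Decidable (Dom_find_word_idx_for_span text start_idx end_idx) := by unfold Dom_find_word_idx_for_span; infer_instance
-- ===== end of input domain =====

-- B replaces A's build-a-marker-list-and-rescan strategy with direct word-count arithmetic (objective: simpler);
-- on texts that themselves contain the sentinel word "<IS_ABSTRACT>", B returns the intended span (see D_ below).

-- ===== PORT A =====
-- pvParts t a b = (t[:a].split(), t[a:b].split(), t[b:].split()) — the three token lists A builds its list from
def pvParts (t : String) (a b : Int) : List String × List String × List String :=
  (PySem.Str.split₀ (PySem.Str.slice t none (some a)),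
   PySem.Str.split₀ (PySem.Str.slice t (some a) (some b)),
   PySem.Str.split₀ (PySem.Str.slice t (some b) none))

-- abstract_idx[0] / abstract_idx[-1] are ported with pyGetD; the default is never used:
-- the length-0 branch has already returned, so both indexings are in range in Python too.
def find_word_idx_for_span (text : String) (start_idx : Int) (end_idx : Int) : Option (Int × Int) :=
  let parts := pvParts text start_idx end_idx
  let new_splitted_text :=
    parts.1 ++ PySem.List.pyRepeat ["<IS_ABSTRACT>"] ((parts.2.1).length : Int) ++ parts.2.2
  let abstract_idx :=
    ((PySem.List.enumerate new_splitted_text 0).filter (fun p => p.2 == "<IS_ABSTRACT>")).map (fun p => p.1)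
  if abstract_idx.length = 0 then none
  else if abstract_idx.length = (PySem.Str.split₀ text).length then none
  else some (PySem.List.pyGetD abstract_idx 0 0, PySem.List.pyGetD abstract_idx (-1) 0)

-- ===== PORT B =====
def find_word_idx_for_span_alt (text : String) (start_idx : Int) (end_idx : Int) : Option (Int × Int) :=
  let p := (PySem.Str.split₀ (PySem.Str.slice text none (some start_idx))).length
  let span := (PySem.Str.split₀ (PySem.Str.slice text (some start_idx) (some end_idx))).length
  if span = 0 then none
  else if span = (PySem.Str.split₀ text).length then none
  else some ((p : Int), (p : Int) + (span : Int) - 1)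

-- ===== PRECONDITION & SPEC =====
-- On texts where the literal token "<IS_ABSTRACT>" occurs as a whitespace-delimited word of the
-- prefix text[:start_idx] or the suffix text[end_idx:] (outside the corner where the span holds no
-- word and the stray tokens make A's second guard fire, where both return None), A mistakes those
-- real words for its sentinel markers and returns their positions (a wrong span, or None), while B
-- returns the word indices of the actual character span, the intended value.
def D_find_word_idx_for_span (text : String) (start_idx : Int) (end_idx : Int) : Prop :=
  let t3 := pvParts text start_idx end_idx
  let u := t3.1 ++ t3.2.2
  "<IS_ABSTRACT>" ∈ u ∧
    (t3.2.1 ≠ [] ∨ u.count "<IS_ABSTRACT>" ≠ (PySem.Str.split₀ text).length)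
instance (text : String) (start_idx : Int) (end_idx : Int) : Decidable (D_find_word_idx_for_span text start_idx end_idx) := by unfold D_find_word_idx_for_span; infer_instance

def Spec_find_word_idx_for_span (text : String) (start_idx : Int) (end_idx : Int) (out : Option (Int × Int)) : Prop := ¬ D_find_word_idx_for_span text start_idx end_idx → out = find_word_idx_for_span_alt text start_idx end_idx
instance (text : String) (start_idx : Int) (end_idx : Int) (out : Option (Int × Int)) : Decidable (Spec_find_word_idx_for_span text start_idx end_idx out) := by unfold Spec_find_word_idx_for_span; infer_instance

def pvDiffWitness_find_word_idx_for_span : String × Int × Int := ("<IS_ABSTRACT> a", 14, 15)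
def pvDiffWitnessOut_find_word_idx_for_span : (Option (Int × Int)) × (Option (Int × Int)) := (none, some (1, 1))

-- ===== CLAIM (what is proved, stated in full; the proofs are below) =====
def Claim_unchanged_find_word_idx_for_span : Prop := ∀ (text : String) (start_idx : Int) (end_idx : Int), Dom_find_word_idx_for_span text start_idx end_idx → Spec_find_word_idx_for_span text start_idx end_idx (find_word_idx_for_span text start_idx end_idx)
def Claim_changed_find_word_idx_for_span : Prop := Dom_find_word_idx_for_span (pvDiffWitness_find_word_idx_for_span.1) (pvDiffWitness_find_word_idx_for_span.2.1) (pvDiffWitness_find_word_idx_for_span.2.2) ∧ D_find_word_idx_for_span (pvDiffWitness_find_word_idx_for_span.1) (pvDiffWitness_find_word_idx_for_span.2.1) (pvDiffWitness_find_word_idx_for_span.2.2) ∧ find_word_idx_for_span (pvDiffWitness_find_word_idx_for_span.1) (pvDiffWitness_find_word_idx_for_span.2.1) (pvDiffWitness_find_word_idx_for_span.2.2) = pvDiffWitnessOut_find_word_idx_for_span.1 ∧ find_word_idx_for_span_alt (pvDiffWitness_find_word_idx_for_span.1) (pvDiffWitness_find_word_idx_for_span.2.1) (pvDiffWitness_find_word_idx_for_span.2.2)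 = pvDiffWitnessOut_find_word_idx_for_span.2 ∧ pvDiffWitnessOut_find_word_idx_for_span.1 ≠ pvDiffWitnessOut_find_word_idx_for_span.2

-- ===== LEMMAS AND PROOFS =====

-- the comprehension's filter keeps nothing coming from a list without the sentinel
theorem pvFiltNomem (xs : List String) (s : Int) (h : "<IS_ABSTRACT>" ∉ xs) :
    (PySem.List.enumerate xs s).filter (fun p => p.2 == "<IS_ABSTRACT>") = [] := by
  induction xs generalizing s with
  | nil => rfl
  | cons x t ih =>
      rw [PySem.List.enumerate_cons, List.filter_cons]
      have hx : ((x : String) == "<IS_ABSTRACT>") = false := by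
        simp only [beq_eq_false_iff_ne, ne_eq]
        intro hxx; exact h (by simp [hxx])
      simp only [hx, Bool.false_eq_true, if_false]
      exact ih (s + 1) (fun hm => h (List.mem_cons_of_mem _ hm))

-- over the sentinel block the filter keeps everything: the indices are s, s+1, …, s+k-1
theorem pvFiltRep (k : Nat) (s : Int) :
    ((PySem.List.enumerate (List.replicate k "<IS_ABSTRACT>") s).filter
        (fun p => p.2 == "<IS_ABSTRACT>")).map (fun p => p.1)
      = (List.range k).map (fun (j : Nat) => s + (j : Int)) := by
  induction k generalizing s with
  | zero => rfl
  | succ k ih =>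
      rw [List.replicate_succ, PySem.List.enumerate_cons, List.filter_cons]
      simp only [beq_self_eq_true, if_true, List.map_cons]
      rw [ih (s + 1), List.range_succ_eq_map, List.map_cons, List.map_map]
      simp only [Nat.cast_zero, add_zero, Function.comp_def]
      exact congrArg (_ :: ·) (List.map_congr_left fun j _ => by push_cast; ring)

-- how many pairs the filter keeps: the sentinel count of the underlying list
theorem pvFiltLen (xs : List String) (s : Int) :
    ((PySem.List.enumerate xs s).filter (fun p => p.2 == "<IS_ABSTRACT>")).length
      = xs.count "<IS_ABSTRACT>" := by
  induction xs generalizing s with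
  | nil => rfl
  | cons x t ih =>
      rw [PySem.List.enumerate_cons, List.filter_cons, List.count_cons]
      by_cases hx : x = "<IS_ABSTRACT>"
      · subst hx; simp [ih (s + 1)]
      · simp [hx, ih (s + 1)]

-- abstract_idx[0] of the arithmetic-progression index list
theorem pvGetZero (k : Nat) (s : Int) (hk : 0 < k) :
    PySem.List.pyGetD ((List.range k).map (fun (j : Nat) => s + (j : Int))) 0 0 = s := by
  simp [PySem.List.pyGetD, PySem.List.pyGet?, PySem.List.pyIdx?, hk]

-- abstract_idx[-1] of the arithmetic-progression index list
theorem pvGetNegOne (k : Nat) (s : Int) (hk : 0 < k) :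
    PySem.List.pyGetD ((List.range k).map (fun (j : Nat) => s + (j : Int))) (-1) 0 = s + k - 1 := by
  have hk1 : 1 ≤ k := hk
  have h2 : k - 1 < k := by omega
  simp [PySem.List.pyGetD, PySem.List.pyGet?, PySem.List.pyIdx?, hk1, List.getElem?_range h2]
  omega

-- A = B outside the sentinel-collision region
theorem pvAB (text : String) (si ei : Int)
    (hnd : ¬ D_find_word_idx_for_span text si ei) :
    find_word_idx_for_span text si ei = find_word_idx_for_span_alt text si ei := by
  simp only [D_find_word_idx_for_span, pvParts] at hnd
  simp only [find_word_idx_for_span, find_word_idx_for_span_alt, pvParts]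
  generalize PySem.Str.split₀ (PySem.Str.slice text none (some si)) = P at hnd ⊢
  generalize PySem.Str.split₀ (PySem.Str.slice text (some si) (some ei)) = Mid at hnd ⊢
  generalize PySem.Str.split₀ (PySem.Str.slice text (some ei) none) = S at hnd ⊢
  generalize PySem.Str.split₀ text = T at hnd ⊢
  rw [PySem.List.pyRepeat_singleton, Int.toNat_natCast]
  rw [PySem.List.enumerate_append, PySem.List.enumerate_append]
  rw [List.filter_append, List.filter_append, List.map_append, List.map_append]
  by_cases hmem : "<IS_ABSTRACT>" ∈ P ++ S
  · -- sentinel words occur, but A's second guard fires: both sides are none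
    have hc : ¬ (Mid ≠ [] ∨ (P ++ S).count "<IS_ABSTRACT>" ≠ T.length) :=
      fun hcc => hnd ⟨hmem, hcc⟩
    push_neg at hc
    obtain ⟨hk0, hcnt⟩ := hc
    rw [List.count_append] at hcnt
    rw [hk0]
    simp only [List.length_nil, List.replicate_zero, List.length_append, List.length_map,
      pvFiltLen, List.count_nil]
    split_ifs <;> first | rfl | (exfalso; omega)
  · -- no sentinel word in the text: abstract_idx is exactly the block of span indices
    rw [List.mem_append] at hmem
    push_neg at hmem
    obtain ⟨hP, hS⟩ := hmem
    rw [pvFiltNomem _ _ hP, pvFiltNomem _ _ hS, pvFiltRep]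
    simp only [List.map_nil, List.nil_append, List.append_nil, List.length_map,
      List.length_range, zero_add]
    by_cases hk : Mid.length = 0
    · simp [hk]
    · by_cases hT : Mid.length = T.length
      · simp [hT]
      · simp only [if_neg hk, if_neg hT]
        rw [pvGetZero _ _ (Nat.pos_of_ne_zero hk), pvGetNegOne _ _ (Nat.pos_of_ne_zero hk)]

-- ===== VERDICT (by name: the statement is the Claim_ definition above) =====
theorem find_word_idx_for_span_spec : Claim_unchanged_find_word_idx_for_span := by
  intro text si ei _ hnd
  exact pvAB text si ei hnd

theorem find_word_idx_for_span_changed : Claim_changed_find_word_idx_for_span := by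
  unfold Claim_changed_find_word_idx_for_span; decide
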